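-- pv_equiv track=rewrite | github.com/pedroborgescruz/Python-Games | Mastermind.py | inexact_matches
-- ===== SOURCE A (Python) =====
-- def inexact_matches(secret_code, guess, status):
--     """
--     This function compares the user's guess and the secret code in order to
--     determine the number of inexact matches, i.e. how many correct colors are in
--     the wrong position. Parameters "secret_code" (the game's secret code),
--     "guess" (the colors entered by the user), and "status" (a list that will be
--     later given as feedback to the user) are required.
--     """
--
--     inexact_matches = 0
--
--     for i in range(4):
--         if status[i] != "exact":
--             for j in range(4):
--                 if guess[i] == secret_code[j]:
--                     if status[j] == "":
--                         inexact_matches += 1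
--                         status[j] = "inexact"
--
--     return inexact_matches
-- ===== SOURCE B (Python) =====
-- def inexact_matches(secret_code, guess, status):
--     # Back-to-front recursion over secret positions: each empty slot is
--     # checked once against the non-exact guess positions (loop inversion).
--     def count_from(j):
--         if j == 4:
--             return 0
--         rest = count_from(j + 1)
--         if status[j] == "" and any(
--             status[i] != "exact" and guess[i] == secret_code[j] for i in range(4)
--         ):
--             status[j] = "inexact"
--             return rest + 1
--         return rest
--
--     return count_from(0)
-- ===== Notes on version B (the rewrite author's own statement) =====
-- stated objective: alternative
-- what changed: A's iterative nested scan (outer loop over guess positions, inner loop marking secret positions) is replaced by a back-to-front recursion over secret positions that checks each empty slot once against the non-exact guess positions; the traversal is inverted and its order proved immaterial.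
-- outside the precondition, e.g. on inexact_matches(['r'], [], ['exact', 'exact', 'exact', 'exact']): A returns 0, B returns 0
import Mathlib
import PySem

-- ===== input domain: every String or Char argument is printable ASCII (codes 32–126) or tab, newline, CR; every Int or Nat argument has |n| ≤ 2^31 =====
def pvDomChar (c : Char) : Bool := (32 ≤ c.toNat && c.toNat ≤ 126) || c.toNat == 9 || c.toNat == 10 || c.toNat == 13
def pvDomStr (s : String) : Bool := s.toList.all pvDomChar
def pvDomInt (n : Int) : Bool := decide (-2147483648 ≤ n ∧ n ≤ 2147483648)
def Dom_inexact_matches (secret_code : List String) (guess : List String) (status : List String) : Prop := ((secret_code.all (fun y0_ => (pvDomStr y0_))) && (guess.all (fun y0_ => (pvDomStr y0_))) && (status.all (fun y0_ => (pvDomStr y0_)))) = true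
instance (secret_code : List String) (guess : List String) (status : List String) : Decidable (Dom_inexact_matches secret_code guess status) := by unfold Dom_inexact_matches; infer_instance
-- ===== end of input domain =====

-- B inverts A's traversal: instead of A's iterative nested scan (outer over guess
-- positions, inner marking secret positions), B recurses back-to-front over secret
-- positions, checking each empty slot once against the non-exact guess positions
-- (objective: alternative). Both Pythons mutate `status` identically; the theorems
-- below are about the return value.

-- ===== PORT A =====
-- inner loop body: for j in range(4): if guess[i] == secret_code[j]: if status[j] == "": count, mark
def aInner (secret_code : List String) (guess : List String) (i : Nat) (t : Int × List String) (j : Nat) : Int × List String :=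
  if guess.getD i "" = secret_code.getD j "" then
    if t.2.getD j "" = "" then (t.1 + 1, t.2.set j "inexact") else t
  else t
-- outer loop body: for i in range(4): if status[i] != "exact": inner loop
def aOuter (secret_code : List String) (guess : List String) (s : Int × List String) (i : Nat) : Int × List String :=
  if s.2.getD i "" ≠ "exact" then (List.range 4).foldl (aInner secret_code guess i) s else s
def inexact_matches (secret_code : List String) (guess : List String) (status : List String) : Int :=
  ((List.range 4).foldl (aOuter secret_code guess) (0, status)).1

-- ===== PORT B =====
-- count_from(j), with k = 4 - j remaining positions; state = (count so far, status list);
-- the recursive call happens FIRST (Python recurses before testing its own j), so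
-- position 3 is handled first and j = 3 - k' at depth k'+1.
def bGo (secret_code : List String) (guess : List String) : Nat → List String → Int × List String
  | 0, st => (0, st)
  | k+1, st =>
    let p := bGo secret_code guess k st
    let j := 3 - k
    if p.2.getD j "" = "" ∧ (List.range 4).any
        (fun i => (p.2.getD i "" != "exact") && (guess.getD i "" == secret_code.getD j "")) = true
    then (p.1 + 1, p.2.set j "inexact") else p
def inexact_matches_alt (secret_code : List String) (guess : List String) (status : List String) : Int :=
  (bGo secret_code guess 4 status).1

-- ===== PRECONDITION & SPEC =====
-- A indexes status[0..3], guess[0..3] and secret_code[0..3]; it raises IndexError on shorter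
-- lists, except on degenerate inputs where the statuses block all indexing (all four statuses
-- "exact"); there A still returns 0 (and B returns 0 too) — see the cite in claim.json.
def Pre_inexact_matches (secret_code : List String) (guess : List String) (status : List String) : Prop :=
  4 ≤ secret_code.length ∧ 4 ≤ guess.length ∧ 4 ≤ status.length
instance (secret_code : List String) (guess : List String) (status : List String) : Decidable (Pre_inexact_matches secret_code guess status) := by unfold Pre_inexact_matches; infer_instance
def pvWitness_inexact_matches : List String × List String × List String :=
  (["r", "g", "b", "y"], ["g", "r", "p", "p"], ["", "", "", ""])
def Spec_inexact_matches (secret_code : List String) (guess : List String) (status : List String) (out : Int) : Prop := out = inexact_matches_alt secret_code guess status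
instance (secret_code : List String) (guess : List String) (status : List String) (out : Int) : Decidable (Spec_inexact_matches secret_code guess status out) := by unfold Spec_inexact_matches; infer_instance

-- ===== CLAIM (what is proved, stated in full; the proofs are below) =====
def Claim_equal_inexact_matches : Prop := ∀ (secret_code : List String) (guess : List String) (status : List String), Dom_inexact_matches secret_code guess status → Pre_inexact_matches secret_code guess status → Spec_inexact_matches secret_code guess status (inexact_matches secret_code guess status)

-- ===== LEMMAS AND PROOFS =====

-- pvM g sc t I j: after A has processed outer positions < I, secret position j is marked "inexact"
def pvM (g sc t : List String) (I j : Nat) : Bool :=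
  (t.getD j "" == "") && (List.range I).any (fun i => (t.getD i "" != "exact") && (g.getD i "" == sc.getD j ""))
-- pvD: the status entry at j after outer prefix I
def pvD (g sc t : List String) (I j : Nat) : String :=
  if pvM g sc t I j then "inexact" else t.getD j ""
-- pvC: the counter after outer prefix I
def pvC (g sc t : List String) (I : Nat) : Int :=
  (((if pvM g sc t I 0 then (1:Int) else 0) + (if pvM g sc t I 1 then 1 else 0))
    + (if pvM g sc t I 2 then 1 else 0)) + (if pvM g sc t I 3 then 1 else 0)

lemma pvM_succ (g sc t : List String) (I j : Nat) :
    pvM g sc t (I + 1) j =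
      (pvM g sc t I j || ((t.getD j "" == "") && ((t.getD I "" != "exact") && (g.getD I "" == sc.getD j "")))) := by
  simp [pvM, List.range_succ, Bool.and_or_distrib_left]

lemma pvM_empty (g sc t : List String) (I j : Nat) (h : pvM g sc t I j = true) :
    t.getD j "" = "" := by
  simp [pvM] at h; exact h.1

lemma aApp0 (sc g : List String) (i : Nat) (c : Int) (a b d e : String) (r : List String) :
    aInner sc g i (c, a :: b :: d :: e :: r) 0
      = (c + (if g.getD i "" = sc.getD 0 "" ∧ a = "" then 1 else 0),
         (if g.getD i "" = sc.getD 0 "" ∧ a = "" then "inexact" else a) :: b :: d :: e :: r) := by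
  unfold aInner; split_ifs <;> simp_all [List.getD]

lemma aApp1 (sc g : List String) (i : Nat) (c : Int) (a b d e : String) (r : List String) :
    aInner sc g i (c, a :: b :: d :: e :: r) 1
      = (c + (if g.getD i "" = sc.getD 1 "" ∧ b = "" then 1 else 0),
         a :: (if g.getD i "" = sc.getD 1 "" ∧ b = "" then "inexact" else b) :: d :: e :: r) := by
  unfold aInner; split_ifs <;> simp_all [List.getD]

lemma aApp2 (sc g : List String) (i : Nat) (c : Int) (a b d e : String) (r : List String) :
    aInner sc g i (c, a :: b :: d :: e :: r) 2
      = (c + (if g.getD i "" = sc.getD 2 "" ∧ d = "" then 1 else 0),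
         a :: b :: (if g.getD i "" = sc.getD 2 "" ∧ d = "" then "inexact" else d) :: e :: r) := by
  unfold aInner; split_ifs <;> simp_all [List.getD]

lemma aApp3 (sc g : List String) (i : Nat) (c : Int) (a b d e : String) (r : List String) :
    aInner sc g i (c, a :: b :: d :: e :: r) 3
      = (c + (if g.getD i "" = sc.getD 3 "" ∧ e = "" then 1 else 0),
         a :: b :: d :: (if g.getD i "" = sc.getD 3 "" ∧ e = "" then "inexact" else e) :: r) := by
  unfold aInner; split_ifs <;> simp_all [List.getD]

lemma aInner_eval (sc g : List String) (i : Nat) (c : Int) (a b d e : String) (r : List String) :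
    (List.range 4).foldl (aInner sc g i) (c, a :: b :: d :: e :: r)
    = (((c + (if g.getD i "" = sc.getD 0 "" ∧ a = "" then 1 else 0)
          + (if g.getD i "" = sc.getD 1 "" ∧ b = "" then 1 else 0))
          + (if g.getD i "" = sc.getD 2 "" ∧ d = "" then 1 else 0))
          + (if g.getD i "" = sc.getD 3 "" ∧ e = "" then 1 else 0),
       (if g.getD i "" = sc.getD 0 "" ∧ a = "" then "inexact" else a) ::
       (if g.getD i "" = sc.getD 1 "" ∧ b = "" then "inexact" else b) ::
       (if g.getD i "" = sc.getD 2 "" ∧ d = "" then "inexact" else d) ::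
       (if g.getD i "" = sc.getD 3 "" ∧ e = "" then "inexact" else e) :: r) := by
  simp only [show List.range 4 = [0, 1, 2, 3] from rfl, List.foldl_cons, List.foldl_nil,
    aApp0, aApp1, aApp2, aApp3]

lemma pvD_succ (g sc t : List String) (I j : Nat) (hE : t.getD I "" ≠ "exact") :
    pvD g sc t (I + 1) j
      = (if g.getD I "" = sc.getD j "" ∧ pvD g sc t I j = "" then "inexact" else pvD g sc t I j) := by
  by_cases hm : pvM g sc t I j = true
  · have hu := pvM_empty g sc t I j hm
    simp [pvD, pvM_succ, hm]
  · by_cases hu : t.getD j "" = "" <;> by_cases hg : g.getD I "" = sc.getD j "" <;>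
      simp_all [pvD, pvM_succ, List.getD]

lemma pvCnt_succ (g sc t : List String) (I j : Nat) (hE : t.getD I "" ≠ "exact") :
    (if pvM g sc t (I + 1) j then (1:Int) else 0)
      = (if pvM g sc t I j then (1:Int) else 0)
        + (if g.getD I "" = sc.getD j "" ∧ pvD g sc t I j = "" then 1 else 0) := by
  by_cases hm : pvM g sc t I j = true
  · have hu := pvM_empty g sc t I j hm
    simp [pvD, pvM_succ, hm]
  · by_cases hu : t.getD j "" = "" <;> by_cases hg : g.getD I "" = sc.getD j "" <;>
      simp_all [pvD, pvM_succ, List.getD]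

lemma stepA (sc g t : List String) (I : Nat) (hI : I < 4) :
    aOuter sc g (pvC g sc t I,
        pvD g sc t I 0 :: pvD g sc t I 1 :: pvD g sc t I 2 :: pvD g sc t I 3 :: t.drop 4) I
    = (pvC g sc t (I + 1),
        pvD g sc t (I+1) 0 :: pvD g sc t (I+1) 1 :: pvD g sc t (I+1) 2 :: pvD g sc t (I+1) 3 :: t.drop 4) := by
  by_cases hE : t.getD I "" = "exact"
  · have hE' : t[I]?.getD "" = "exact" := by simpa [List.getD] using hE
    have hM : ∀ j, pvM g sc t (I + 1) j = pvM g sc t I j := by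
      intro j; simp [pvM_succ, List.getD, hE']
    have hD : ∀ j, pvD g sc t (I + 1) j = pvD g sc t I j := by
      intro j; simp [pvD, hM]
    have hcheck : pvD g sc t I I = "exact" := by
      simp [pvD, pvM, List.getD, hE']
    unfold aOuter
    interval_cases I <;> simp_all [pvC]
  · have hcheck : pvD g sc t I I ≠ "exact" := by
      unfold pvD; split_ifs <;> simp_all
    unfold aOuter
    have hget : (pvD g sc t I 0 :: pvD g sc t I 1 :: pvD g sc t I 2 :: pvD g sc t I 3 :: t.drop 4).getD I ""
        = pvD g sc t I I := by interval_cases I <;> rfl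
    rw [hget, if_pos hcheck, aInner_eval]
    simp only [Prod.mk.injEq, List.cons.injEq]
    refine ⟨?_, ?_, ?_, ?_, ?_, trivial⟩
    · simp only [pvC, pvCnt_succ g sc t I _ hE]; ring
    · exact (pvD_succ g sc t I 0 hE).symm
    · exact (pvD_succ g sc t I 1 hE).symm
    · exact (pvD_succ g sc t I 2 hE).symm
    · exact (pvD_succ g sc t I 3 hE).symm

lemma A_eval (sc g : List String) (t0 t1 t2 t3 : String) (tr : List String) :
    inexact_matches sc g (t0 :: t1 :: t2 :: t3 :: tr)
      = pvC g sc (t0 :: t1 :: t2 :: t3 :: tr) 4 := by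
  have hbase : ((0 : Int), t0 :: t1 :: t2 :: t3 :: tr)
      = (pvC g sc (t0 :: t1 :: t2 :: t3 :: tr) 0,
         pvD g sc (t0 :: t1 :: t2 :: t3 :: tr) 0 0 :: pvD g sc (t0 :: t1 :: t2 :: t3 :: tr) 0 1 ::
         pvD g sc (t0 :: t1 :: t2 :: t3 :: tr) 0 2 :: pvD g sc (t0 :: t1 :: t2 :: t3 :: tr) 0 3 ::
         (t0 :: t1 :: t2 :: t3 :: tr).drop 4) := by
    simp [pvC, pvD, pvM]
  unfold inexact_matches
  simp only [show List.range 4 = [0, 1, 2, 3] from rfl, List.foldl_cons, List.foldl_nil]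
  rw [hbase, stepA sc g _ 0 (by omega), stepA sc g _ 1 (by omega),
      stepA sc g _ 2 (by omega), stepA sc g _ 3 (by omega)]

-- an already-final entry is ≠ "exact" exactly when the original entry is
lemma pvD_ne_exact (g sc t : List String) (j : Nat) :
    ((pvD g sc t 4 j) != "exact") = ((t.getD j "") != "exact") := by
  by_cases hm : pvM g sc t 4 j = true
  · have hu := pvM_empty g sc t 4 j hm
    simp only [List.getD] at hu
    simp [pvD, hm, hu]
  · simp [pvD, hm]

-- B's per-position condition, read on a partially-final status, equals pvM _ 4 j
lemma condB (g sc t : List String) (e0 e1 e2 e3 : String) (r : List String) (j : Nat)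
    (h0 : (e0 != "exact") = (t.getD 0 "" != "exact"))
    (h1 : (e1 != "exact") = (t.getD 1 "" != "exact"))
    (h2 : (e2 != "exact") = (t.getD 2 "" != "exact"))
    (h3 : (e3 != "exact") = (t.getD 3 "" != "exact")) :
    (List.range 4).any
        (fun i => ((e0 :: e1 :: e2 :: e3 :: r).getD i "" != "exact") && (g.getD i "" == sc.getD j ""))
      = (List.range 4).any (fun i => (t.getD i "" != "exact") && (g.getD i "" == sc.getD j "")) := by
  simp only [show List.range 4 = [0, 1, 2, 3] from rfl, List.any_cons, List.any_nil,
    List.getD_cons_zero, List.getD_cons_succ, h0, h1, h2, h3]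

lemma bGoStep1 (sc g : List String) (t0 t1 t2 t3 : String) (tr : List String) :
    bGo sc g 1 (t0 :: t1 :: t2 :: t3 :: tr) = ((if pvM g sc (t0 :: t1 :: t2 :: t3 :: tr) 4 3 then ((0:Int) + 1) else 0), t0 :: t1 :: t2 :: pvD g sc (t0 :: t1 :: t2 :: t3 :: tr) 4 3 :: tr) := by
  have hu : bGo sc g 1 (t0 :: t1 :: t2 :: t3 :: tr) = (if (bGo sc g 0 (t0 :: t1 :: t2 :: t3 :: tr)).2.getD 3 "" = "" ∧ (List.range 4).any (fun i => ((bGo sc g 0 (t0 :: t1 :: t2 :: t3 :: tr)).2.getD i "" != "exact") && (g.getD i "" == sc.getD 3 "")) = true then ((bGo sc g 0 (t0 :: t1 :: t2 :: t3 :: tr)).1 + 1, (bGo sc g 0 (t0 :: t1 :: t2 :: t3 :: tr)).2.set 3 "inexact") else (bGo sc g 0 (t0 :: t1 :: t2 :: t3 :: tr))) := rfl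
  rw [hu, show bGo sc g 0 (t0 :: t1 :: t2 :: t3 :: tr) = ((0:Int), (t0 :: t1 :: t2 :: t3 :: tr)) from rfl]
  by_cases hm : pvM g sc (t0 :: t1 :: t2 :: t3 :: tr) 4 3 = true
  · have hm' := hm
    rw [pvM, Bool.and_eq_true, beq_iff_eq] at hm'
    simp only [List.getD_cons_zero, List.getD_cons_succ] at hm' ⊢
    rw [if_pos ⟨hm'.1, hm'.2⟩]
    simp [pvD, hm]
  · rw [if_neg (fun h => hm (by rw [pvM, Bool.and_eq_true, beq_iff_eq]; exact ⟨h.1, h.2⟩))]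
    simp [pvD, hm]

lemma bGoStep2 (sc g : List String) (t0 t1 t2 t3 : String) (tr : List String) :
    bGo sc g 2 (t0 :: t1 :: t2 :: t3 :: tr) = ((if pvM g sc (t0 :: t1 :: t2 :: t3 :: tr) 4 2 then (if pvM g sc (t0 :: t1 :: t2 :: t3 :: tr) 4 3 then ((0:Int) + 1) else 0) + 1 else (if pvM g sc (t0 :: t1 :: t2 :: t3 :: tr) 4 3 then ((0:Int) + 1) else 0)), t0 :: t1 :: pvD g sc (t0 :: t1 :: t2 :: t3 :: tr) 4 2 :: pvD g sc (t0 :: t1 :: t2 :: t3 :: tr) 4 3 :: tr) := by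
  have hu : bGo sc g 2 (t0 :: t1 :: t2 :: t3 :: tr) = (if (bGo sc g 1 (t0 :: t1 :: t2 :: t3 :: tr)).2.getD 2 "" = "" ∧ (List.range 4).any (fun i => ((bGo sc g 1 (t0 :: t1 :: t2 :: t3 :: tr)).2.getD i "" != "exact") && (g.getD i "" == sc.getD 2 "")) = true then ((bGo sc g 1 (t0 :: t1 :: t2 :: t3 :: tr)).1 + 1, (bGo sc g 1 (t0 :: t1 :: t2 :: t3 :: tr)).2.set 2 "inexact") else (bGo sc g 1 (t0 :: t1 :: t2 :: t3 :: tr))) := rfl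
  rw [hu, bGoStep1 sc g t0 t1 t2 t3 tr]
  rw [condB g sc (t0 :: t1 :: t2 :: t3 :: tr) t0 (t1) (t2) (pvD g sc (t0 :: t1 :: t2 :: t3 :: tr) 4 3) tr 2 rfl rfl rfl (pvD_ne_exact g sc (t0 :: t1 :: t2 :: t3 :: tr) 3)]
  by_cases hm : pvM g sc (t0 :: t1 :: t2 :: t3 :: tr) 4 2 = true
  · have hm' := hm
    rw [pvM, Bool.and_eq_true, beq_iff_eq] at hm'
    simp only [List.getD_cons_zero, List.getD_cons_succ] at hm' ⊢
    rw [if_pos ⟨hm'.1, hm'.2⟩]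
    simp [pvD, hm]
  · rw [if_neg (fun h => hm (by rw [pvM, Bool.and_eq_true, beq_iff_eq]; exact ⟨h.1, h.2⟩))]
    simp [pvD, hm]

lemma bGoStep3 (sc g : List String) (t0 t1 t2 t3 : String) (tr : List String) :
    bGo sc g 3 (t0 :: t1 :: t2 :: t3 :: tr) = ((if pvM g sc (t0 :: t1 :: t2 :: t3 :: tr) 4 1 then (if pvM g sc (t0 :: t1 :: t2 :: t3 :: tr) 4 2 then (if pvM g sc (t0 :: t1 :: t2 :: t3 :: tr) 4 3 then ((0:Int) + 1) else 0) + 1 else (if pvM g sc (t0 :: t1 :: t2 :: t3 :: tr) 4 3 then ((0:Int) + 1) else 0)) + 1 else (if pvM g sc (t0 :: t1 :: t2 :: t3 :: tr) 4 2 then (if pvM g sc (t0 :: t1 :: t2 :: t3 :: tr) 4 3 then ((0:Int) + 1) else 0) + 1 else (if pvM g sc (t0 :: t1 :: t2 :: t3 :: tr) 4 3 then ((0:Int) + 1) else 0))), t0 :: pvD g sc (t0 :: t1 :: t2 :: t3 :: tr) 4 1 :: pvD g sc (t0 :: t1 :: t2 :: t3 :: tr) 4 2 :: pvD g sc (t0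 :: t1 :: t2 :: t3 :: tr) 4 3 :: tr) := by
  have hu : bGo sc g 3 (t0 :: t1 :: t2 :: t3 :: tr) = (if (bGo sc g 2 (t0 :: t1 :: t2 :: t3 :: tr)).2.getD 1 "" = "" ∧ (List.range 4).any (fun i => ((bGo sc g 2 (t0 :: t1 :: t2 :: t3 :: tr)).2.getD i "" != "exact") && (g.getD i "" == sc.getD 1 "")) = true then ((bGo sc g 2 (t0 :: t1 :: t2 :: t3 :: tr)).1 + 1, (bGo sc g 2 (t0 :: t1 :: t2 :: t3 :: tr)).2.set 1 "inexact") else (bGo sc g 2 (t0 :: t1 :: t2 :: t3 :: tr))) := rfl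
  rw [hu, bGoStep2 sc g t0 t1 t2 t3 tr]
  rw [condB g sc (t0 :: t1 :: t2 :: t3 :: tr) t0 (t1) (pvD g sc (t0 :: t1 :: t2 :: t3 :: tr) 4 2) (pvD g sc (t0 :: t1 :: t2 :: t3 :: tr) 4 3) tr 1 rfl rfl (pvD_ne_exact g sc (t0 :: t1 :: t2 :: t3 :: tr) 2) (pvD_ne_exact g sc (t0 :: t1 :: t2 :: t3 :: tr) 3)]
  by_cases hm : pvM g sc (t0 :: t1 :: t2 :: t3 :: tr) 4 1 = true
  · have hm' := hm
    rw [pvM, Bool.and_eq_true, beq_iff_eq] at hm'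
    simp only [List.getD_cons_zero, List.getD_cons_succ] at hm' ⊢
    rw [if_pos ⟨hm'.1, hm'.2⟩]
    simp [pvD, hm]
  · rw [if_neg (fun h => hm (by rw [pvM, Bool.and_eq_true, beq_iff_eq]; exact ⟨h.1, h.2⟩))]
    simp [pvD, hm]

lemma bGoStep4 (sc g : List String) (t0 t1 t2 t3 : String) (tr : List String) :
    bGo sc g 4 (t0 :: t1 :: t2 :: t3 :: tr) = ((if pvM g sc (t0 :: t1 :: t2 :: t3 :: tr) 4 0 then (if pvM g sc (t0 :: t1 :: t2 :: t3 :: tr) 4 1 then (if pvM g sc (t0 :: t1 :: t2 :: t3 :: tr) 4 2 then (if pvM g sc (t0 :: t1 :: t2 :: t3 :: tr) 4 3 then ((0:Int) + 1) else 0) + 1 else (if pvM g sc (t0 :: t1 :: t2 :: t3 :: tr) 4 3 then ((0:Int) + 1) else 0)) + 1 else (if pvM g sc (t0 :: t1 :: t2 :: t3 :: tr) 4 2 then (if pvM g sc (t0 :: t1 :: t2 :: t3 :: tr) 4 3 then ((0:Int) + 1) else 0) + 1 else (if pvM g sc (t0 :: t1 :: t2 :: t3 :: tr) 4 3 then ((0:Int)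 + 1) else 0))) + 1 else (if pvM g sc (t0 :: t1 :: t2 :: t3 :: tr) 4 1 then (if pvM g sc (t0 :: t1 :: t2 :: t3 :: tr) 4 2 then (if pvM g sc (t0 :: t1 :: t2 :: t3 :: tr) 4 3 then ((0:Int) + 1) else 0) + 1 else (if pvM g sc (t0 :: t1 :: t2 :: t3 :: tr) 4 3 then ((0:Int) + 1) else 0)) + 1 else (if pvM g sc (t0 :: t1 :: t2 :: t3 :: tr) 4 2 then (if pvM g sc (t0 :: t1 :: t2 :: t3 :: tr) 4 3 then ((0:Int) + 1) else 0) + 1 else (if pvM g sc (t0 :: t1 :: t2 :: t3 :: tr) 4 3 then ((0:Int) + 1) else 0)))), pvD g sc (t0 :: t1 :: t2 :: t3 :: tr) 4 0 :: pvD g sc (t0 :: t1 :: t2 :: t3 :: tr) 4 1 :: pvD g sc (t0 :: t1 :: t2 :: t3 :: tr) 4 2 :: pvD g sc (t0 :: t1 :: t2 :: t3 :: tr) 4 3 :: tr) := by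
  have hu : bGo sc g 4 (t0 :: t1 :: t2 :: t3 :: tr) = (if (bGo sc g 3 (t0 :: t1 :: t2 :: t3 :: tr)).2.getD 0 "" = "" ∧ (List.range 4).any (fun i => ((bGo sc g 3 (t0 :: t1 :: t2 :: t3 :: tr)).2.getD i "" != "exact") && (g.getD i "" == sc.getD 0 "")) = true then ((bGo sc g 3 (t0 :: t1 :: t2 :: t3 :: tr)).1 + 1, (bGo sc g 3 (t0 :: t1 :: t2 :: t3 :: tr)).2.set 0 "inexact") else (bGo sc g 3 (t0 :: t1 :: t2 :: t3 :: tr))) := rfl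
  rw [hu, bGoStep3 sc g t0 t1 t2 t3 tr]
  rw [condB g sc (t0 :: t1 :: t2 :: t3 :: tr) t0 (pvD g sc (t0 :: t1 :: t2 :: t3 :: tr) 4 1) (pvD g sc (t0 :: t1 :: t2 :: t3 :: tr) 4 2) (pvD g sc (t0 :: t1 :: t2 :: t3 :: tr) 4 3) tr 0 rfl (pvD_ne_exact g sc (t0 :: t1 :: t2 :: t3 :: tr) 1) (pvD_ne_exact g sc (t0 :: t1 :: t2 :: t3 :: tr) 2) (pvD_ne_exact g sc (t0 :: t1 :: t2 :: t3 :: tr) 3)]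
  by_cases hm : pvM g sc (t0 :: t1 :: t2 :: t3 :: tr) 4 0 = true
  · have hm' := hm
    rw [pvM, Bool.and_eq_true, beq_iff_eq] at hm'
    simp only [List.getD_cons_zero] at hm' ⊢
    rw [if_pos ⟨hm'.1, hm'.2⟩]
    simp [pvD, hm]
  · rw [if_neg (fun h => hm (by rw [pvM, Bool.and_eq_true, beq_iff_eq]; exact ⟨h.1, h.2⟩))]
    simp [pvD, hm]

lemma B_eval (sc g : List String) (t0 t1 t2 t3 : String) (tr : List String) :
    inexact_matches_alt sc g (t0 :: t1 :: t2 :: t3 :: tr)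
      = pvC g sc (t0 :: t1 :: t2 :: t3 :: tr) 4 := by
  unfold inexact_matches_alt
  rw [bGoStep4]
  simp only [pvC]
  split_ifs <;> ring

-- ===== VERDICT (by name: the statement is the Claim_ definition above) =====
theorem inexact_matches_spec : Claim_equal_inexact_matches := by
  intro sc g st _ hpre
  obtain ⟨t0, t1, t2, t3, tr, rfl⟩ : ∃ a b c d r, st = a :: b :: c :: d :: r := by
    match st, hpre.2.2 with | a::b::c::d::r, _ => exact ⟨a,b,c,d,r,rfl⟩
  unfold Spec_inexact_matches
  rw [A_eval, B_eval]
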